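-- pv_equiv track=rewrite | github.com/ungit003/ungiTIL | aps12/240904/magnetic.py | find
-- ===== SOURCE A (Python) =====
-- def find(m):
--     cnt = 0
--     for row in m:
--         for i in range(len(row)-1, -1, -1):
--             if row[i] == '0':
--                 row.pop(i)
--         finder = ''.join(row)
--         for i in range(len(finder)-1):
--             if finder[i] == '1' and finder[i+1] == '2':
--                 cnt += 1
--     return cnt
-- ===== SOURCE B (Python) =====
-- def find(m):
--     cnt = 0
--     for row in m:
--         prev = None
--         for x in row:
--             if x == '0':
--                 continue
--             for c in x:
--                 if prev == '1' and c == '2':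
--                     cnt += 1
--                 prev = c
--     return cnt
-- ===== Notes on version B (the rewrite author's own statement) =====
-- stated objective: alternative
-- what changed: B replaces A's backward index-and-pop deletion loop plus a joined-string index scan per row by a single pass over the row's characters that skips '0' cells and counts a '1'-then-'2' transition via one carried previous-character variable; B also does not mutate the input rows.
import Mathlib
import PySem

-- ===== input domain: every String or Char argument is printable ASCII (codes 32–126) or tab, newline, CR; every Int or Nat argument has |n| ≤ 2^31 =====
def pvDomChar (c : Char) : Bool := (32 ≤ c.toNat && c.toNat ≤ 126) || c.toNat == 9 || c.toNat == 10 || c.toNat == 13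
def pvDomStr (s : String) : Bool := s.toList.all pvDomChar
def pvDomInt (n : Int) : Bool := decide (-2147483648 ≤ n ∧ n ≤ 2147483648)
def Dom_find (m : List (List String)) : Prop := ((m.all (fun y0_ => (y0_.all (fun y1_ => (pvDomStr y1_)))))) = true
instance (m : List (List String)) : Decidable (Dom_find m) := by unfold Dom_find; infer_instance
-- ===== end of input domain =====

-- B: one pass per row carrying the previous non-'0'-cell character instead of A's
-- backward pop loop + joined-string index scan (alternative single-pass algorithm;
-- A mutates the rows in place, B does not — the equivalence proved is about the
-- return value only).

-- ===== PORT A =====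
-- for i in range(len(row)-1, -1, -1): if row[i] == '0': row.pop(i)
def stripZeros (row : List String) : List String :=
  (PySem.List.pyRange ((row.length : Int) - 1) (-1) (-1)).foldl
    (fun r i =>
      match PySem.List.pyGet? r i with
      | some s => if s = "0" then ((PySem.List.pop? r i).map (·.2)).getD r else r
      | none => r) row

def find (m : List (List String)) : Int :=
  m.foldl
    (fun cnt row =>
      let row' := stripZeros row
      let finder : List Char := PySem.Chars.join [] (row'.map String.toList)
      (PySem.List.pyRange 0 ((finder.length : Int) - 1) 1).foldl
        (fun c i =>
          if PySem.List.pyGetD finder i ' ' = '1' ∧ PySem.List.pyGetD finder (i + 1) ' ' = '2'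
          then c + 1 else c) cnt) 0

-- ===== PORT B =====
def find_alt (m : List (List String)) : Int :=
  m.foldl
    (fun cnt row =>
      (row.foldl
        (fun (st : Option Char × Int) x =>
          if x = "0" then st
          else x.toList.foldl
            (fun (st : Option Char × Int) c =>
              (some c, if st.1 = some '1' ∧ c = '2' then st.2 + 1 else st.2)) st)
        (none, cnt)).2) 0

-- ===== PRECONDITION & SPEC =====
def Spec_find (m : List (List String)) (out : Int) : Prop := out = find_alt m
instance (m : List (List String)) (out : Int) : Decidable (Spec_find m out) := by unfold Spec_find; infer_instance

-- ===== CLAIM (what is proved, stated in full; the proofs are below) =====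
def Claim_equal_find : Prop := ∀ (m : List (List String)), Dom_find m → Spec_find m (find m)

-- ===== LEMMAS AND PROOFS =====

-- number of adjacent '1','2' pairs in a character list
def pairs : List Char → Int
  | a :: b :: t => (if a = '1' ∧ b = '2' then 1 else 0) + pairs (b :: t)
  | _ => 0

-- B's transition counter carrying the previous character
def go : Option Char → List Char → Int
  | _, [] => 0
  | p, c :: t => (if p = some '1' ∧ c = '2' then 1 else 0) + go (some c) t

-- the previous-character state after consuming cs
def np (p : Option Char) (cs : List Char) : Option Char :=
  match cs.getLast? with
  | some c => some c
  | none => p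

theorem np_cons (p : Option Char) (c : Char) (t : List Char) :
    np p (c :: t) = np (some c) t := by
  cases t with
  | nil => simp [np]
  | cons d u =>
    cases h : (d :: u).getLast? with
    | some e => simp [np, List.getLast?_cons_cons, h]
    | none => simp [List.getLast?_eq_none_iff] at h

theorem np_append (p : Option Char) (a b : List Char) :
    np p (a ++ b) = np (np p a) b := by
  cases hb : b.getLast? with
  | some c => unfold np; rw [List.getLast?_append, hb, Option.some_or]
  | none =>
    have hbe : b = [] := List.getLast?_eq_none_iff.mp hb
    subst hbe; simp [np]

theorem stripZeros_loop (r : List String) (j : Nat) (hj : j ≤ r.length) :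
    (PySem.List.pyRange ((j : Int) - 1) (-1) (-1)).foldl
      (fun r i =>
        match PySem.List.pyGet? r i with
        | some s => if s = "0" then ((PySem.List.pop? r i).map (·.2)).getD r else r
        | none => r) r
    = (r.take j).filter (fun s => decide (s ≠ "0")) ++ r.drop j := by
  induction j generalizing r with
  | zero =>
    rw [PySem.List.pyRange_neg_one_eq_nil (by omega)]
    simp
  | succ j ih =>
    have hlt : (j : Nat) < r.length := by omega
    rw [show ((j + 1 : Nat) : Int) - 1 = (j : Int) by push_cast; ring,
        PySem.List.pyRange_neg_one_cons (by omega), List.foldl_cons]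
    simp only [PySem.List.pyGet?_natCast, List.getElem?_eq_getElem hlt]
    have htake : r.take (j + 1) = r.take j ++ [r[j]] := by
      rw [List.take_add_one]; simp [List.getElem?_eq_getElem hlt]
    by_cases h0 : r[j] = "0"
    · simp only [if_pos h0]
      rw [PySem.List.pop?_natCast r j hlt]
      simp only [Option.map_some, Option.getD_some]
      rw [ih _ (by rw [List.length_eraseIdx_of_lt hlt]; omega)]
      rw [List.eraseIdx_eq_take_drop_succ]
      rw [List.take_append_of_le_length (by simp; omega),
          List.take_take, Nat.min_self,
          List.drop_append_of_le_length (by simp; omega),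
          List.drop_take]
      have hz : j - j = 0 := by omega
      rw [hz, List.take_zero, List.nil_append, htake]
      simp [h0]
    · rw [if_neg h0]
      have hdropj : r.drop j = r[j] :: r.drop (j + 1) :=
        List.drop_eq_getElem_cons hlt
      rw [ih _ (by omega), htake, List.filter_append, hdropj]
      simp [h0]

theorem stripZeros_eq_filter (row : List String) :
    stripZeros row = row.filter (fun s => decide (s ≠ "0")) := by
  have := stripZeros_loop row row.length le_rfl
  simpa [stripZeros] using this

theorem countA_loop (cs : List Char) (k j : Nat) (h : j + k + 1 = cs.length) (cnt : Int) :
    (PySem.List.pyRange (j : Int) ((cs.length : Int) - 1) 1).foldl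
      (fun c i =>
        if PySem.List.pyGetD cs i ' ' = '1' ∧ PySem.List.pyGetD cs (i + 1) ' ' = '2'
        then c + 1 else c) cnt
    = cnt + pairs (cs.drop j) := by
  induction k generalizing j cnt with
  | zero =>
    rw [PySem.List.pyRange_one_eq_nil (by omega)]
    have hs : cs.drop j = [cs[j]] := by
      have h1 : cs.drop j = cs[j] :: cs.drop (j + 1) := List.drop_eq_getElem_cons (by omega)
      rw [h1, List.drop_eq_nil_of_le (by omega)]
    simp [hs, pairs]
  | succ k ih =>
    have hj : j < cs.length := by omega
    have hj1 : j + 1 < cs.length := by omega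
    rw [PySem.List.pyRange_one_cons (by omega), List.foldl_cons]
    have e1 : PySem.List.pyGetD cs (j : Int) ' ' = cs[j] := by
      rw [PySem.List.pyGetD_natCast, List.getD_eq_getElem?_getD, List.getElem?_eq_getElem hj,
          Option.getD_some]
    have e2 : PySem.List.pyGetD cs ((j : Int) + 1) ' ' = cs[j + 1] := by
      rw [show ((j : Int) + 1) = ((j + 1 : Nat) : Int) by push_cast; ring,
          PySem.List.pyGetD_natCast, List.getD_eq_getElem?_getD, List.getElem?_eq_getElem hj1,
          Option.getD_some]
    rw [e1, e2, show ((j : Int) + 1) = ((j + 1 : Nat) : Int) by push_cast; ring,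
        ih (j + 1) (by omega)]
    have hd1 : cs.drop (j + 1) = cs[j + 1] :: cs.drop (j + 2) :=
      List.drop_eq_getElem_cons hj1
    have hd : cs.drop j = cs[j] :: cs[j + 1] :: cs.drop (j + 2) := by
      rw [List.drop_eq_getElem_cons hj, ← hd1]
    rw [hd, hd1, pairs]
    split_ifs with hif <;> ring

theorem countA_eq_pairs (cs : List Char) (cnt : Int) :
    (PySem.List.pyRange 0 ((cs.length : Int) - 1) 1).foldl
      (fun c i =>
        if PySem.List.pyGetD cs i ' ' = '1' ∧ PySem.List.pyGetD cs (i + 1) ' ' = '2'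
        then c + 1 else c) cnt
    = cnt + pairs cs := by
  match hcs : cs with
  | [] => rw [PySem.List.pyRange_one_eq_nil (by simp)]; simp [pairs]
  | c :: t =>
    have := countA_loop (c :: t) t.length 0 (by simp) cnt
    simpa using this

theorem go_append (a b : List Char) (p : Option Char) :
    go p (a ++ b) = go p a + go (np p a) b := by
  induction a generalizing p with
  | nil => simp [go, np]
  | cons c t ih =>
    simp only [List.cons_append, go, ih (some c), np_cons]
    ring

theorem go_some_eq_pairs (cs : List Char) (p : Char) :
    go (some p) cs = pairs (p :: cs) := by
  induction cs generalizing p with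
  | nil => simp [go, pairs]
  | cons c t ih => simp only [go, pairs, ih c, Option.some.injEq]

theorem go_none_eq_pairs (cs : List Char) : go none cs = pairs cs := by
  cases cs with
  | nil => simp [go, pairs]
  | cons c t =>
    rw [show go none (c :: t) = 0 + go (some c) t from rfl, go_some_eq_pairs]
    simp

theorem b_inner (cs : List Char) (st : Option Char × Int) :
    cs.foldl
      (fun (st : Option Char × Int) c =>
        (some c, if st.1 = some '1' ∧ c = '2' then st.2 + 1 else st.2)) st
    = (np st.1 cs, st.2 + go st.1 cs) := by
  induction cs generalizing st with
  | nil => simp [go, np]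
  | cons c t ih =>
    rw [List.foldl_cons, ih]
    rw [np_cons]
    simp only [go, Prod.mk.injEq]
    refine ⟨trivial, ?_⟩
    split_ifs with h <;> ring

theorem b_row (ss : List String) (st : Option Char × Int) :
    ss.foldl
      (fun (st : Option Char × Int) x =>
        if x = "0" then st
        else x.toList.foldl
          (fun (st : Option Char × Int) c =>
            (some c, if st.1 = some '1' ∧ c = '2' then st.2 + 1 else st.2)) st) st
    = (np st.1 (((ss.filter (fun s => decide (s ≠ "0"))).map String.toList).flatten),
       st.2 + go st.1 (((ss.filter (fun s => decide (s ≠ "0"))).map String.toList).flatten)) := by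
  induction ss generalizing st with
  | nil => simp [go, np]
  | cons x t ih =>
    rw [List.foldl_cons]
    by_cases hx : x = "0"
    · rw [if_pos hx, ih]
      simp [hx]
    · rw [if_neg hx, b_inner, ih]
      have hfl : (((x :: t).filter (fun s => decide (s ≠ "0"))).map String.toList).flatten
          = x.toList ++ ((t.filter (fun s => decide (s ≠ "0"))).map String.toList).flatten := by
        simp [hx]
      rw [hfl, go_append, np_append]
      simp only [Prod.mk.injEq]
      exact ⟨trivial, by ring⟩

theorem join_nil_eq_flatten (l : List (List Char)) :
    PySem.Chars.join [] l = l.flatten := by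
  induction l with
  | nil => simp [PySem.Chars.join_nil]
  | cons a t ih =>
    cases t with
    | nil => simp [PySem.Chars.join_singleton]
    | cons b u =>
      rw [PySem.Chars.join_cons_cons, ih]
      simp

theorem row_step (cnt : Int) (row : List String) :
    (let row' := stripZeros row
     let finder : List Char := PySem.Chars.join [] (row'.map String.toList)
     (PySem.List.pyRange 0 ((finder.length : Int) - 1) 1).foldl
       (fun c i =>
         if PySem.List.pyGetD finder i ' ' = '1' ∧ PySem.List.pyGetD finder (i + 1) ' ' = '2'
         then c + 1 else c) cnt)
    = (row.foldl
        (fun (st : Option Char × Int) x =>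
          if x = "0" then st
          else x.toList.foldl
            (fun (st : Option Char × Int) c =>
              (some c, if st.1 = some '1' ∧ c = '2' then st.2 + 1 else st.2)) st)
        (none, cnt)).2 := by
  simp only [stripZeros_eq_filter, join_nil_eq_flatten, countA_eq_pairs, b_row,
    go_none_eq_pairs]

-- ===== VERDICT (by name: the statement is the Claim_ definition above) =====
theorem find_spec : Claim_equal_find := by
  intro m _
  unfold Spec_find find find_alt
  exact List.foldl_ext _ _ 0 (fun cnt row _ => row_step cnt row)
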